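-- pv_equiv track=rewrite | github.com/bpa/advent-of-code | 2025/python/day10.py | machine_to_int
-- ===== SOURCE A (Python) =====
-- def machine_to_int(machine):
--    value = 0
--    bit = 1
--    for b in machine[1:-1]:
--       if b == '#':
--          value += bit
--       bit <<= 1
--    return value
-- ===== SOURCE B (Python) =====
-- def machine_to_int(machine):
--     # Horner evaluation: read the slice MSB-first (reversed, since the first
--     # char of machine[1:-1] is the least significant bit) and fold value*2+bit.
--     value = 0
--     for c in machine[1:-1][::-1]:
--         value = 2 * value + (c == '#')
--     return value
-- ===== Notes on version B (the rewrite author's own statement) =====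
-- stated objective: alternative
-- what changed: Replaces the LSB-first scan that maintains a separate doubling bit-weight accumulator with a reversed-slice Horner fold (value = 2*value + bit) that needs no weight variable.
import Mathlib
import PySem

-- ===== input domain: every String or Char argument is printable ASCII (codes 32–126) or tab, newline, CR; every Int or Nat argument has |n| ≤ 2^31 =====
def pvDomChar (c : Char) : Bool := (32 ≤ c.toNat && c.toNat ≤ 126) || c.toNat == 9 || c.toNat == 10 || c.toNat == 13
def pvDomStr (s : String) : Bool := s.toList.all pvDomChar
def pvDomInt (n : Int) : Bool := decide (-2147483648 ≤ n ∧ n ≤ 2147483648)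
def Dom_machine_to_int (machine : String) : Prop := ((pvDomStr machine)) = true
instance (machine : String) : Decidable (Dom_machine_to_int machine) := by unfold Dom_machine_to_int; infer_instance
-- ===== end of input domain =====

-- B replaces A's LSB-first scan with its doubling bit-weight accumulator by a
-- Horner fold over the reversed slice (value = 2*value + bit); same O(n) cost.

-- ===== PORT A =====
-- for b in machine[1:-1]: value += bit if b == '#'; bit <<= 1
def machine_to_int (machine : String) : Int :=
  let r := (PySem.Str.slice machine (some 1) (some (-1))).toList.foldl
    (fun (vb : Int × Int) b => (if b == '#' then vb.1 + vb.2 else vb.1, vb.2 <<< (1:Nat))) (0, 1)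
  r.1

-- ===== PORT B =====
-- for c in machine[1:-1][::-1]: value = 2 * value + (c == '#')
def machine_to_int_alt (machine : String) : Int :=
  let core := PySem.Str.slice machine (some 1) (some (-1))
  ((PySem.Str.slice? core none none (-1)).getD "").toList.foldl
    (fun (value : Int) c => 2 * value + (if c == '#' then 1 else 0)) 0

-- ===== PRECONDITION & SPEC =====
def Spec_machine_to_int (machine : String) (out : Int) : Prop := out = machine_to_int_alt machine
instance (machine : String) (out : Int) : Decidable (Spec_machine_to_int machine out) := by unfold Spec_machine_to_int; infer_instance

-- ===== CLAIM (what is proved, stated in full; the proofs are below) =====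
def Claim_equal_machine_to_int : Prop := ∀ (machine : String), Dom_machine_to_int machine → Spec_machine_to_int machine (machine_to_int machine)

-- ===== LEMMAS AND PROOFS =====

-- The mathematical value both loops compute: LSB-first binary value of the '#' mask.
def pvH : List Char → Int
  | [] => 0
  | c :: r => (if c == '#' then 1 else 0) + 2 * pvH r

theorem pvA_fold (cs : List Char) : ∀ (v b : Int),
    (cs.foldl (fun (vb : Int × Int) c =>
      (if c == '#' then vb.1 + vb.2 else vb.1, vb.2 <<< (1:Nat))) (v, b)).1 = v + b * pvH cs := by
  induction cs with
  | nil => intro v b; simp [pvH]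
  | cons c r ih =>
    intro v b
    simp only [List.foldl_cons, pvH, ih]
    have hb : b <<< (1:Nat) = b * 2 := by
      rw [Int.shiftLeft_eq]; ring
    by_cases h : c = '#' <;> simp [h, hb] <;> ring

theorem pvB_fold (cs : List Char) : ∀ (a : Int),
    cs.reverse.foldl (fun (value : Int) c => 2 * value + (if c == '#' then 1 else 0)) a
      = a * 2 ^ cs.length + pvH cs := by
  induction cs with
  | nil => intro a; simp [pvH]
  | cons c r ih =>
    intro a
    simp only [List.reverse_cons, List.foldl_append, List.foldl_cons, List.foldl_nil, ih, pvH,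
      List.length_cons]
    ring

-- ===== VERDICT (by name: the statement is the Claim_ definition above) =====
theorem machine_to_int_spec : Claim_equal_machine_to_int := by
  intro machine _
  unfold Spec_machine_to_int
  show (machine_to_int machine) = _
  simp only [machine_to_int, machine_to_int_alt, PySem.Str.slice?_none_none_neg_one,
    Option.getD_some, String.toList_ofList]
  rw [pvB_fold, pvA_fold]
  ring
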